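-- pv_equiv track=rewrite | github.com/MoKangMedical/medi-slim | wecom_handoff.py | _pick_consultant
-- ===== SOURCE A (Python) =====
-- from typing import Any
--
-- CONSULTANTS = [
--     {"id": "c01", "name": "顾问 A"},
--     {"id": "c02", "name": "顾问 B"},
--     {"id": "c03", "name": "顾问 C"},
-- ]
--
-- def _pick_consultant(queue: dict[str, Any], requested_id: str = "") -> dict[str, str]:
--     if requested_id:
--         for consultant in CONSULTANTS:
--             if consultant["id"] == requested_id or consultant["name"] == requested_id:
--                 return consultant
--
--     loads = {consultant["id"]: 0 for consultant in CONSULTANTS}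
--     for thread in queue.values():
--         if thread.get("status") != "closed" and thread.get("consultant_id") in loads:
--             loads[thread["consultant_id"]] += 1
--
--     consultant_id = min(loads, key=loads.get)
--     return next(consultant for consultant in CONSULTANTS if consultant["id"] == consultant_id)
-- ===== SOURCE B (Python) =====
-- from typing import Any
--
-- CONSULTANTS = [
--     {"id": "c01", "name": "顾问 A"},
--     {"id": "c02", "name": "顾问 B"},
--     {"id": "c03", "name": "顾问 C"},
-- ]
--
-- def _pick_consultant(queue: dict[str, Any], requested_id: str = "") -> dict[str, str]:
--     if requested_id:
--         for consultant in CONSULTANTS: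
--             if consultant["id"] == requested_id or consultant["name"] == requested_id:
--                 return consultant
--
--     def load(cid: str) -> int:
--         return sum(
--             1
--             for thread in queue.values()
--             if thread.get("status") != "closed" and thread.get("consultant_id") == cid
--         )
--
--     return min(CONSULTANTS, key=lambda c: load(c["id"]))
-- ===== Notes on version B (the rewrite author's own statement) =====
-- stated objective: simpler
-- what changed: B drops the loads index dict, the counting loop and the final next() lookup; it keeps the requested_id block and instead computes each consultant's load by a direct scan of the queue and returns min(CONSULTANTS, key=load), preserving first-minimum tie-breaking.
import Mathlib
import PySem

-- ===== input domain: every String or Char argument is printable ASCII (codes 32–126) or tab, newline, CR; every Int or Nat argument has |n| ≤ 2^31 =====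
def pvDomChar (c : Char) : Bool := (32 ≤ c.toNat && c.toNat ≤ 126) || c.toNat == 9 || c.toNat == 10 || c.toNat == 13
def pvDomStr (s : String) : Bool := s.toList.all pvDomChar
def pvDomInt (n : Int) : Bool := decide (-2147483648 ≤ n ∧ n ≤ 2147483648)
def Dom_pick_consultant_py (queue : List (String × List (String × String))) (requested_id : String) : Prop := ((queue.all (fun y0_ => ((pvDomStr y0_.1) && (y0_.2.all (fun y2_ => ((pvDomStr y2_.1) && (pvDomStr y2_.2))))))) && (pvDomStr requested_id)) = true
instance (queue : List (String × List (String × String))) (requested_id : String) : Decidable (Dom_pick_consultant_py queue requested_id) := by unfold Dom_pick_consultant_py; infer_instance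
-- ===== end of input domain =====

-- B drops A's loads-index dict, its counting loop and the final next() lookup, computing each
-- consultant's load by a direct scan of the queue and taking min(CONSULTANTS, key=load): simpler.

-- ===== PORT A =====
-- module constant CONSULTANTS (each consultant dict as an association list)
def pvConsultants : List (List (String × String)) :=
  [[("id", "c01"), ("name", "顾问 A")],
   [("id", "c02"), ("name", "顾问 B")],
   [("id", "c03"), ("name", "顾问 C")]]

-- the `if requested_id:` loop, byte-identical in A and in B (shared transliteration)
def pvFindRequested (cs : List (List (String × String))) (requested_id : String) :
    Option (List (String × String)) :=
  match cs with
  | [] => none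
  | c :: rest =>
      if (PySem.Dict.mk c).getD "id" "" = requested_id ∨
         (PySem.Dict.mk c).getD "name" "" = requested_id then some c
      else pvFindRequested rest requested_id

-- body of A's counting loop (`thread.get(...)` lookups; `in loads` is key membership,
-- false for a missing "consultant_id"; the guarded `loads[...] += 1` is modify)
def pvLoadsStep (d : PySem.Dict String Int) (t : List (String × String)) :
    PySem.Dict String Int :=
  let td := PySem.Dict.mk t
  match td.get? "consultant_id" with
  | some cid =>
      if td.get? "status" ≠ some "closed" ∧ d.contains cid = true then d.modify cid 0 (· + 1)
      else d
  | none => d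

-- min(loads, key=loads.get): first key of minimal value, in dict (= insertion) order
def pvMinKey (items : List (String × Int)) : String :=
  match items with
  | [] => ""
  | p :: rest => (rest.foldl (fun best q => if q.2 < best.2 then q else best) p).1

-- A's else-path: build loads, count over queue.values(), arg-min key, then
-- next(consultant for consultant in CONSULTANTS if consultant["id"] == consultant_id)
def pvPickByLoads (queue : List (String × List (String × String))) :
    List (String × String) :=
  let loads0 := pvConsultants.foldl
    (fun d c => d.insert ((PySem.Dict.mk c).getD "id" "") (0 : Int)) PySem.Dict.empty
  let loads := queue.foldl (fun d p => pvLoadsStep d p.2) loads0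
  let consultant_id := pvMinKey loads.items
  match pvConsultants.find? (fun c => (PySem.Dict.mk c).getD "id" "" == consultant_id) with
  | some c => c
  | none => []   -- unreachable: the arg-min key is always one of the three consultant ids

def pick_consultant_py (queue : List (String × List (String × String)))
    (requested_id : String) : List (String × String) :=
  match (if requested_id ≠ "" then pvFindRequested pvConsultants requested_id else none) with
  | some c => c
  | none => pvPickByLoads queue

-- ===== PORT B =====
-- load(cid): one fresh scan of queue.values() per consultant (sum of a 0/1 generator)
def pvLoad (queue : List (String × List (String × String))) (cid : String) : Int :=
  queue.foldl
    (fun n p =>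
      let td := PySem.Dict.mk p.2
      if td.get? "status" ≠ some "closed" ∧ td.get? "consultant_id" = some cid then n + 1
      else n) 0

-- min(CONSULTANTS, key=lambda c: load(c["id"])): first minimum, key computed once per element
def pvMinByLoad (queue : List (String × List (String × String)))
    (cs : List (List (String × String))) : List (String × String) :=
  match cs with
  | [] => []
  | c0 :: rest =>
      (rest.foldl
        (fun best c =>
          let k := pvLoad queue ((PySem.Dict.mk c).getD "id" "")
          if k < best.2 then (c, k) else best)
        (c0, pvLoad queue ((PySem.Dict.mk c0).getD "id" ""))).1

def pick_consultant_py_alt (queue : List (String × List (String × String)))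
    (requested_id : String) : List (String × String) :=
  match (if requested_id ≠ "" then pvFindRequested pvConsultants requested_id else none) with
  | some c => c
  | none => pvMinByLoad queue pvConsultants

-- ===== PRECONDITION & SPEC =====
def Spec_pick_consultant_py (queue : List (String × List (String × String))) (requested_id : String) (out : List (String × String)) : Prop := out = pick_consultant_py_alt queue requested_id
instance (queue : List (String × List (String × String))) (requested_id : String) (out : List (String × String)) : Decidable (Spec_pick_consultant_py queue requested_id out) := by unfold Spec_pick_consultant_py; infer_instance

-- ===== CLAIM (what is proved, stated in full; the proofs are below) =====
def Claim_equal_pick_consultant_py : Prop := ∀ (queue : List (String × List (String × String))) (requested_id : String), Dom_pick_consultant_py queue requested_id → Spec_pick_consultant_py queue requested_id (pick_consultant_py queue requested_id)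

-- ===== LEMMAS AND PROOFS =====
lemma pv_step_none (t : List (String × String))
    (h : (PySem.Dict.mk t).get? "consultant_id" = none) (d : PySem.Dict String Int) :
    pvLoadsStep d t = d := by
  simp only [pvLoadsStep, h]

lemma pv_step_some (t : List (String × String)) (cid : String)
    (h : (PySem.Dict.mk t).get? "consultant_id" = some cid) (d : PySem.Dict String Int) :
    pvLoadsStep d t =
      if (PySem.Dict.mk t).get? "status" ≠ some "closed" ∧ d.contains cid = true then
        d.modify cid 0 (· + 1)
      else d := by
  simp only [pvLoadsStep, h]

-- B's one-consultant count, started from an arbitrary accumulator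
lemma pv_load_shift (q : List (String × List (String × String))) (cid : String) :
    ∀ n : Int, q.foldl
      (fun n p =>
        let td := PySem.Dict.mk p.2
        if td.get? "status" ≠ some "closed" ∧ td.get? "consultant_id" = some cid then n + 1
        else n) n = n + pvLoad q cid := by
  induction q with
  | nil => intro n; simp [pvLoad]
  | cons p q ih =>
      intro n
      simp only [pvLoad, List.foldl_cons]
      rw [ih, ih]
      split_ifs <;> omega

lemma pv_load_cons (p : String × List (String × String))
    (q : List (String × List (String × String))) (cid : String) :
    pvLoad (p :: q) cid =
      (if (PySem.Dict.mk p.2).get? "status" ≠ some "closed" ∧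
          (PySem.Dict.mk p.2).get? "consultant_id" = some cid then 1 else 0) + pvLoad q cid := by
  simp only [pvLoad, List.foldl_cons]
  rw [show (List.foldl _ _ q : Int) = _ from pv_load_shift q cid _]
  simp only [pvLoad]
  split_ifs <;> omega

-- A's loads fold on the three-key dict, expressed through B's per-consultant counts
lemma pv_loads_eq (queue : List (String × List (String × String))) (a b c : Int) :
    queue.foldl (fun d p => pvLoadsStep d p.2)
      (PySem.Dict.mk [("c01", a), ("c02", b), ("c03", c)]) =
    PySem.Dict.mk [("c01", a + pvLoad queue "c01"), ("c02", b + pvLoad queue "c02"),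
                   ("c03", c + pvLoad queue "c03")] := by
  induction queue generalizing a b c with
  | nil => simp [pvLoad]
  | cons p q ih =>
      rw [List.foldl_cons, pv_load_cons, pv_load_cons, pv_load_cons]
      show List.foldl _ (pvLoadsStep (PySem.Dict.mk [("c01", a), ("c02", b), ("c03", c)]) p.2) q = _
      cases hc : (PySem.Dict.mk p.2).get? "consultant_id" with
      | none =>
          rw [pv_step_none _ hc, ih]
          simp
      | some cid =>
          rw [pv_step_some _ _ hc]
          by_cases hs : (PySem.Dict.mk p.2).get? "status" ≠ some "closed"
          · by_cases h1 : cid = "c01"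
            · subst h1
              rw [if_pos ⟨hs, rfl⟩,
                show (PySem.Dict.mk [("c01", a), ("c02", b), ("c03", c)]).modify "c01" 0 (· + 1)
                  = PySem.Dict.mk [("c01", a + 1), ("c02", b), ("c03", c)] from rfl, ih]
              simp [hs]
              omega
            · by_cases h2 : cid = "c02"
              · subst h2
                rw [if_pos ⟨hs, rfl⟩,
                  show (PySem.Dict.mk [("c01", a), ("c02", b), ("c03", c)]).modify "c02" 0 (· + 1)
                    = PySem.Dict.mk [("c01", a), ("c02", b + 1), ("c03", c)] from rfl, ih]
                simp [hs]
                omega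
              · by_cases h3 : cid = "c03"
                · subst h3
                  rw [if_pos ⟨hs, rfl⟩,
                    show (PySem.Dict.mk [("c01", a), ("c02", b), ("c03", c)]).modify "c03" 0 (· + 1)
                      = PySem.Dict.mk [("c01", a), ("c02", b), ("c03", c + 1)] from rfl, ih]
                  simp [hs]
                  omega
                · have hcont : (PySem.Dict.mk [("c01", a), ("c02", b), ("c03", c)]).contains cid = false := by
                    have e1 : (("c01":String) == cid) = false := beq_eq_false_iff_ne.mpr (fun h => h1 h.symm)
                    have e2 : (("c02":String) == cid) = false := beq_eq_false_iff_ne.mpr (fun h => h2 h.symm)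
                    have e3 : (("c03":String) == cid) = false := beq_eq_false_iff_ne.mpr (fun h => h3 h.symm)
                    simp [PySem.Dict.contains_mk, e1, e2, e3]
                  rw [if_neg (fun h => by rw [hcont] at h; exact absurd h.2 (by decide)), ih]
                  simp [h1, h2, h3]
          · rw [if_neg (by tauto), ih]
            rw [ne_eq, not_not] at hs
            simp [hs]

-- A's else-path equals B's else-path on every queue
lemma pv_tail_eq (queue : List (String × List (String × String))) :
    pvPickByLoads queue = pvMinByLoad queue pvConsultants := by
  show (match List.find? (fun c => (PySem.Dict.mk c).getD "id" "" ==
      pvMinKey ((List.foldl (fun d p => pvLoadsStep d p.2)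
        (PySem.Dict.mk [("c01", (0:Int)), ("c02", 0), ("c03", 0)]) queue)).items) pvConsultants with
    | some c => c
    | none => []) = pvMinByLoad queue pvConsultants
  rw [pv_loads_eq]
  simp only [zero_add]
  unfold pvMinByLoad pvConsultants pvMinKey
  simp only [List.foldl_cons, List.foldl_nil]
  rw [show ((PySem.Dict.mk [("id", "c01"), ("name", "顾问 A")]).getD "id" "") = "c01" from rfl,
      show ((PySem.Dict.mk [("id", "c02"), ("name", "顾问 B")]).getD "id" "") = "c02" from rfl,
      show ((PySem.Dict.mk [("id", "c03"), ("name", "顾问 C")]).getD "id" "") = "c03" from rfl]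
  by_cases h21 : pvLoad queue "c02" < pvLoad queue "c01"
  · by_cases h32 : pvLoad queue "c03" < pvLoad queue "c02"
    · simp [h21, h32, List.find?]
      rfl
    · simp [h21, h32, List.find?]
      rfl
  · by_cases h31 : pvLoad queue "c03" < pvLoad queue "c01"
    · simp [h21, h31, List.find?]
      rfl
    · simp [h21, h31, List.find?]
      rfl

-- ===== VERDICT (by name: the statement is the Claim_ definition above) =====
theorem pick_consultant_py_spec : Claim_equal_pick_consultant_py := by
  intro queue requested_id _
  unfold Spec_pick_consultant_py pick_consultant_py pick_consultant_py_alt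
  cases h : (if requested_id ≠ "" then pvFindRequested pvConsultants requested_id else none) with
  | some c => rfl
  | none => exact pv_tail_eq queue
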